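-- pv_equiv track=rewrite | github.com/m4quick/m4quick-quail | scripts/mail-scanner.py | analyze_senders
-- ===== SOURCE A (Python) =====
-- def analyze_senders(senders_text):
--     """Analyze sender list for sales/advertising patterns"""
--     if not senders_text:
--         return {}
--
--     senders = [s.strip() for s in senders_text.split(",") if s.strip()]
--
--     categories = {
--         'retail': [],
--         'newsletters': [],
--         'shipping': [],
--         'promotions': [],
--         'other': []
--     }
--
--     retail_domains = ['amazon', 'walmart', 'target', 'bestbuy', 'homedepot', 'lowes', 'costco', 'ebay', 'etsy']
--     newsletter_keywords = ['newsletter', 'digest', 'weekly', 'daily', 'update']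
--     shipping_keywords = ['usps', 'ups', 'fedex', 'dhl', 'shipping', 'tracking', 'delivered']
--     promo_keywords = ['noreply', 'info', 'marketing', 'promotions', 'deals', 'offers', 'sale']
--
--     for sender in senders:
--         sender_lower = sender.lower()
--         categorized = False
--
--         for domain in retail_domains:
--             if domain in sender_lower:
--                 categories['retail'].append(sender)
--                 categorized = True
--                 break
--
--         if not categorized:
--             for kw in shipping_keywords:
--                 if kw in sender_lower:
--                     categories['shipping'].append(sender)
--                     categorized = True
--                     break
--
--         if not categorized:
--             for kw in promo_keywords:
--                 if kw in sender_lower: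
--                     categories['promotions'].append(sender)
--                     categorized = True
--                     break
--
--         if not categorized:
--             for kw in newsletter_keywords:
--                 if kw in sender_lower:
--                     categories['newsletters'].append(sender)
--                     categorized = True
--                     break
--
--         if not categorized:
--             categories['other'].append(sender)
--
--     return categories
-- ===== SOURCE B (Python) =====
-- def analyze_senders(senders_text):
--     """Analyze sender list for sales/advertising patterns"""
--     if not senders_text:
--         return {}
--
--     retail = ['amazon', 'walmart', 'target', 'bestbuy', 'homedepot', 'lowes', 'costco', 'ebay', 'etsy']
--     newsletter_kws = ['newsletter', 'digest', 'weekly', 'daily', 'update']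
--     shipping_kws = ['usps', 'ups', 'fedex', 'dhl', 'shipping', 'tracking', 'delivered']
--     promo_kws = ['noreply', 'info', 'marketing', 'promotions', 'deals', 'offers', 'sale']
--
--     # staged whole-list passes: peel each category off the remaining pool in
--     # priority order; whatever survives all four passes lands in the last category
--     remaining = [(s, s.lower()) for s in map(str.strip, senders_text.split(",")) if s]
--
--     def take(keywords):
--         nonlocal remaining
--         hit = [s for s, low in remaining if any(kw in low for kw in keywords)]
--         remaining = [p for p in remaining if not any(kw in p[1] for kw in keywords)]
--         return hit
--
--     retail_hits = take(retail)
--     shipping_hits = take(shipping_kws)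
--     promo_hits = take(promo_kws)
--     news_hits = take(newsletter_kws)
--
--     return {
--         'retail': retail_hits,
--         'newsletters': news_hits,
--         'shipping': shipping_hits,
--         'promotions': promo_hits,
--         'other': [s for s, _ in remaining],
--     }
-- ===== Notes on version B (the rewrite author's own statement) =====
-- stated objective: alternative
-- what changed: Replaces A's single pass that classifies each sender with a four-branch flag chain by staged whole-list passes: each category is peeled off the remaining pool with a stable partition in priority order, and the survivors form the final fallback category.
import Mathlib
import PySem

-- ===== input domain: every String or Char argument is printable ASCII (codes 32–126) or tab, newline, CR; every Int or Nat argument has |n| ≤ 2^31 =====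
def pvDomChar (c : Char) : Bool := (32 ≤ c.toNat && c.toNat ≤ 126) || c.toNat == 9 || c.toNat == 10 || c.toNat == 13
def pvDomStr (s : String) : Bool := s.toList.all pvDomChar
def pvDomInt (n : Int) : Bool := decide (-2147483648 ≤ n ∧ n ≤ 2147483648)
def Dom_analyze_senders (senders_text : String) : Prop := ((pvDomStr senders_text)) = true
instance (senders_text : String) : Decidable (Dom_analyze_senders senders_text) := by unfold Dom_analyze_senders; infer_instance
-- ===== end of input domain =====

-- B replaces A's single pass with a per-sender four-branch flag chain by staged
-- whole-list passes that peel each category off a remaining pool in priority order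
-- (objective: alternative decomposition, same cost).


-- ===== PORT A =====
def pvRetailA : List String := ["amazon", "walmart", "target", "bestbuy", "homedepot", "lowes", "costco", "ebay", "etsy"]
def pvNewsA : List String := ["newsletter", "digest", "weekly", "daily", "update"]
def pvShipA : List String := ["usps", "ups", "fedex", "dhl", "shipping", "tracking", "delivered"]
def pvPromoA : List String := ["noreply", "info", "marketing", "promotions", "deals", "offers", "sale"]

-- the body of A's for-loop: the categorized-flag chain of four keyword scans (each
-- inner for-with-break over a keyword list is its .any), then the 'other' fallback
def pvStepA (cats : PySem.Dict String (List String)) (sender : String) :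
    PySem.Dict String (List String) :=
  -- sender_lower = sender.lower(), inlined at each use
  if pvRetailA.any (fun domain => PySem.Str.isIn domain (PySem.Str.lower sender)) then
    cats.modify "retail" [] (· ++ [sender])
  else if pvShipA.any (fun kw => PySem.Str.isIn kw (PySem.Str.lower sender)) then
    cats.modify "shipping" [] (· ++ [sender])
  else if pvPromoA.any (fun kw => PySem.Str.isIn kw (PySem.Str.lower sender)) then
    cats.modify "promotions" [] (· ++ [sender])
  else if pvNewsA.any (fun kw => PySem.Str.isIn kw (PySem.Str.lower sender)) then
    cats.modify "newsletters" [] (· ++ [sender])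
  else
    cats.modify "other" [] (· ++ [sender])

def analyze_senders (senders_text : String) : List (String × List String) :=
  if senders_text = "" then []
  else
    -- s.split(","): sep is the non-empty literal ",", so split? never returns none
    let senders := (((PySem.Str.split? senders_text ",").getD []).filter
        (fun s => PySem.Str.strip s != "")).map PySem.Str.strip
    let categories : PySem.Dict String (List String) :=
      PySem.Dict.ofList
        [("retail", []), ("newsletters", []), ("shipping", []), ("promotions", []), ("other", [])]
    (senders.foldl pvStepA categories).items

-- ===== PORT B =====
def pvRetailB : List String := ["amazon", "walmart", "target", "bestbuy", "homedepot", "lowes", "costco", "ebay", "etsy"]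
def pvNewsB : List String := ["newsletter", "digest", "weekly", "daily", "update"]
def pvShipB : List String := ["usps", "ups", "fedex", "dhl", "shipping", "tracking", "delivered"]
def pvPromoB : List String := ["noreply", "info", "marketing", "promotions", "deals", "offers", "sale"]

-- any(kw in low for kw in keywords)
def pvAnyKw (kws : List String) (low : String) : Bool :=
  kws.any (fun kw => PySem.Str.isIn kw low)

def analyze_senders_alt (senders_text : String) : List (String × List String) :=
  if senders_text = "" then []
  else
    -- [(s, s.lower()) for s in map(str.strip, senders_text.split(",")) if s]
    let remaining0 :=
      ((((PySem.Str.split? senders_text ",").getD []).map PySem.Str.strip).filter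
          (fun s => s != "")).map (fun s => (s, PySem.Str.lower s))
    -- take(retail): hit = matching senders, remaining = the non-matching pairs
    let retail_hits := (remaining0.filter (fun p => pvAnyKw pvRetailB p.2)).map (·.1)
    let remaining1 := remaining0.filter (fun p => !(pvAnyKw pvRetailB p.2))
    let shipping_hits := (remaining1.filter (fun p => pvAnyKw pvShipB p.2)).map (·.1)
    let remaining2 := remaining1.filter (fun p => !(pvAnyKw pvShipB p.2))
    let promo_hits := (remaining2.filter (fun p => pvAnyKw pvPromoB p.2)).map (·.1)
    let remaining3 := remaining2.filter (fun p => !(pvAnyKw pvPromoB p.2))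
    let news_hits := (remaining3.filter (fun p => pvAnyKw pvNewsB p.2)).map (·.1)
    let remaining4 := remaining3.filter (fun p => !(pvAnyKw pvNewsB p.2))
    [("retail", retail_hits), ("newsletters", news_hits), ("shipping", shipping_hits),
     ("promotions", promo_hits), ("other", remaining4.map (·.1))]

-- ===== PRECONDITION & SPEC =====
def Spec_analyze_senders (senders_text : String) (out : List (String × List String)) : Prop := out = analyze_senders_alt senders_text
instance (senders_text : String) (out : List (String × List String)) : Decidable (Spec_analyze_senders senders_text out) := by unfold Spec_analyze_senders; infer_instance

-- ===== CLAIM (what is proved, stated in full; the proofs are below) =====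
def Claim_equal_analyze_senders : Prop := ∀ (senders_text : String), Dom_analyze_senders senders_text → Spec_analyze_senders senders_text (analyze_senders senders_text)

-- ===== LEMMAS AND PROOFS =====

-- proof-only: A's per-sender category as a function
def pvCat (s : String) : String :=
  if pvAnyKw pvRetailA (PySem.Str.lower s) then "retail"
  else if pvAnyKw pvShipA (PySem.Str.lower s) then "shipping"
  else if pvAnyKw pvPromoA (PySem.Str.lower s) then "promotions"
  else if pvAnyKw pvNewsA (PySem.Str.lower s) then "newsletters"
  else "other"

lemma pv_step_eq (cats : PySem.Dict String (List String)) (s : String) :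
    pvStepA cats s = cats.modify (pvCat s) [] (· ++ [s]) := by
  unfold pvStepA pvCat pvAnyKw
  split_ifs <;> rfl

-- the initial dict, as a raw items list
lemma pv_init :
    (PySem.Dict.ofList [("retail",([]:List String)),("newsletters",[]),("shipping",[]),("promotions",[]),("other",[])])
    = PySem.Dict.mk [("retail",[]),("newsletters",[]),("shipping",[]),("promotions",[]),("other",[])] := rfl

-- modify on the 5-key dict, one lemma per key
lemma pv_mod_retail (a b c d e : List String) (s : String) :
    (PySem.Dict.mk [("retail",a),("newsletters",b),("shipping",c),("promotions",d),("other",e)]).modify "retail" [] (· ++ [s])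
    = PySem.Dict.mk [("retail",a ++ [s]),("newsletters",b),("shipping",c),("promotions",d),("other",e)] := by
  simp [PySem.Dict.modify, PySem.Dict.insert, PySem.Dict.get?, PySem.Dict.getD, PySem.Dict.contains]

lemma pv_mod_news (a b c d e : List String) (s : String) :
    (PySem.Dict.mk [("retail",a),("newsletters",b),("shipping",c),("promotions",d),("other",e)]).modify "newsletters" [] (· ++ [s])
    = PySem.Dict.mk [("retail",a),("newsletters",b ++ [s]),("shipping",c),("promotions",d),("other",e)] := by
  simp [PySem.Dict.modify, PySem.Dict.insert, PySem.Dict.get?, PySem.Dict.getD, PySem.Dict.contains]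

lemma pv_mod_ship (a b c d e : List String) (s : String) :
    (PySem.Dict.mk [("retail",a),("newsletters",b),("shipping",c),("promotions",d),("other",e)]).modify "shipping" [] (· ++ [s])
    = PySem.Dict.mk [("retail",a),("newsletters",b),("shipping",c ++ [s]),("promotions",d),("other",e)] := by
  simp [PySem.Dict.modify, PySem.Dict.insert, PySem.Dict.get?, PySem.Dict.getD, PySem.Dict.contains]

lemma pv_mod_promo (a b c d e : List String) (s : String) :
    (PySem.Dict.mk [("retail",a),("newsletters",b),("shipping",c),("promotions",d),("other",e)]).modify "promotions" [] (· ++ [s])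
    = PySem.Dict.mk [("retail",a),("newsletters",b),("shipping",c),("promotions",d ++ [s]),("other",e)] := by
  simp [PySem.Dict.modify, PySem.Dict.insert, PySem.Dict.get?, PySem.Dict.getD, PySem.Dict.contains]

lemma pv_mod_other (a b c d e : List String) (s : String) :
    (PySem.Dict.mk [("retail",a),("newsletters",b),("shipping",c),("promotions",d),("other",e)]).modify "other" [] (· ++ [s])
    = PySem.Dict.mk [("retail",a),("newsletters",b),("shipping",c),("promotions",d),("other",e ++ [s])] := by
  simp [PySem.Dict.modify, PySem.Dict.insert, PySem.Dict.get?, PySem.Dict.getD, PySem.Dict.contains]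

-- A's fold over the 5-key dict, characterised by filters on pvCat
lemma pv_fold_items (senders : List String) (a b c d e : List String) :
    ((senders.foldl pvStepA
        (PySem.Dict.mk [("retail",a),("newsletters",b),("shipping",c),("promotions",d),("other",e)])).items)
    = [("retail", a ++ senders.filter (fun s => pvCat s == "retail")),
       ("newsletters", b ++ senders.filter (fun s => pvCat s == "newsletters")),
       ("shipping", c ++ senders.filter (fun s => pvCat s == "shipping")),
       ("promotions", d ++ senders.filter (fun s => pvCat s == "promotions")),
       ("other", e ++ senders.filter (fun s => pvCat s == "other"))] := by
  induction senders generalizing a b c d e with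
  | nil => simp
  | cons s t ih =>
    rw [List.foldl_cons, pv_step_eq]
    by_cases h1 : pvAnyKw pvRetailA (PySem.Str.lower s) = true
    · have hc : pvCat s = "retail" := by simp [pvCat, h1]
      rw [hc, pv_mod_retail, ih]
      simp [hc]
    · by_cases h2 : pvAnyKw pvShipA (PySem.Str.lower s) = true
      · have hc : pvCat s = "shipping" := by simp [pvCat, h1, h2]
        rw [hc, pv_mod_ship, ih]
        simp [hc]
      · by_cases h3 : pvAnyKw pvPromoA (PySem.Str.lower s) = true
        · have hc : pvCat s = "promotions" := by simp [pvCat, h1, h2, h3]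
          rw [hc, pv_mod_promo, ih]
          simp [hc]
        · by_cases h4 : pvAnyKw pvNewsA (PySem.Str.lower s) = true
          · have hc : pvCat s = "newsletters" := by simp [pvCat, h1, h2, h3, h4]
            rw [hc, pv_mod_news, ih]
            simp [hc]
          · have hc : pvCat s = "other" := by simp [pvCat, h1, h2, h3, h4]
            rw [hc, pv_mod_other, ih]
            simp [hc]

-- pvCat's value, category by category, as the boolean tests B stages its passes with
lemma pv_cat_retail (s : String) :
    (pvCat s == "retail") = pvAnyKw pvRetailA (PySem.Str.lower s) := by
  unfold pvCat; split_ifs <;> simp_all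

lemma pv_cat_ship (s : String) :
    (pvCat s == "shipping")
    = (!pvAnyKw pvRetailA (PySem.Str.lower s) && pvAnyKw pvShipA (PySem.Str.lower s)) := by
  unfold pvCat; split_ifs <;> simp_all

lemma pv_cat_promo (s : String) :
    (pvCat s == "promotions")
    = (!pvAnyKw pvRetailA (PySem.Str.lower s) && !pvAnyKw pvShipA (PySem.Str.lower s)
        && pvAnyKw pvPromoA (PySem.Str.lower s)) := by
  unfold pvCat; split_ifs <;> simp_all

lemma pv_cat_news (s : String) :
    (pvCat s == "newsletters")
    = (!pvAnyKw pvRetailA (PySem.Str.lower s) && !pvAnyKw pvShipA (PySem.Str.lower s)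
        && !pvAnyKw pvPromoA (PySem.Str.lower s) && pvAnyKw pvNewsA (PySem.Str.lower s)) := by
  unfold pvCat; split_ifs <;> simp_all

lemma pv_cat_other (s : String) :
    (pvCat s == "other")
    = (!pvAnyKw pvRetailA (PySem.Str.lower s) && !pvAnyKw pvShipA (PySem.Str.lower s)
        && !pvAnyKw pvPromoA (PySem.Str.lower s) && !pvAnyKw pvNewsA (PySem.Str.lower s)) := by
  unfold pvCat; split_ifs <;> simp_all

-- ===== VERDICT (by name: the statement is the Claim_ definition above) =====
set_option maxHeartbeats 1000000 in
theorem analyze_senders_spec : Claim_equal_analyze_senders := by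
  intro t _
  unfold Spec_analyze_senders analyze_senders analyze_senders_alt
  by_cases h : t = ""
  · simp [h]
  · simp only [h, if_false]
    set parts := (PySem.Str.split? t ",").getD [] with hp
    have hswap : (parts.filter (fun s => PySem.Str.strip s != "")).map PySem.Str.strip
        = (parts.map PySem.Str.strip).filter (fun s => s != "") := by
      induction parts with
      | nil => rfl
      | cons p q ih =>
        by_cases hs : PySem.Str.strip p = "" <;>
          simp [hs, ih]
    rw [pv_init, pv_fold_items, hswap]
    set senders := (parts.map PySem.Str.strip).filter (fun s => s != "") with hsen
    -- B side: push the pairing map through the staged filters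
    simp only [List.filter_map, List.map_map, List.filter_filter, Function.comp_def,
      List.map_id', List.nil_append]
    have eR : pvAnyKw pvRetailB = pvAnyKw pvRetailA := rfl
    have eS : pvAnyKw pvShipB = pvAnyKw pvShipA := rfl
    have eP : pvAnyKw pvPromoB = pvAnyKw pvPromoA := rfl
    have eN : pvAnyKw pvNewsB = pvAnyKw pvNewsA := rfl
    simp only [eR, eS, eP, eN, List.cons.injEq, Prod.mk.injEq, true_and, and_true]
    refine ⟨?_, ?_, ?_, ?_, ?_⟩ <;> refine List.filter_congr fun s _ => ?_
    · rw [pv_cat_retail]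
    · rw [pv_cat_news]
      by_cases h1 : pvAnyKw pvRetailA (PySem.Str.lower s) = true <;>
        by_cases h2 : pvAnyKw pvShipA (PySem.Str.lower s) = true <;>
          by_cases h3 : pvAnyKw pvPromoA (PySem.Str.lower s) = true <;>
            by_cases h4 : pvAnyKw pvNewsA (PySem.Str.lower s) = true <;>
              simp [h1, h2, h3, h4]
    · rw [pv_cat_ship]
      by_cases h1 : pvAnyKw pvRetailA (PySem.Str.lower s) = true <;>
        by_cases h2 : pvAnyKw pvShipA (PySem.Str.lower s) = true <;>
          simp [h1, h2]
    · rw [pv_cat_promo]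
      by_cases h1 : pvAnyKw pvRetailA (PySem.Str.lower s) = true <;>
        by_cases h2 : pvAnyKw pvShipA (PySem.Str.lower s) = true <;>
          by_cases h3 : pvAnyKw pvPromoA (PySem.Str.lower s) = true <;>
            simp [h1, h2, h3]
    · rw [pv_cat_other]
      by_cases h1 : pvAnyKw pvRetailA (PySem.Str.lower s) = true <;>
        by_cases h2 : pvAnyKw pvShipA (PySem.Str.lower s) = true <;>
          by_cases h3 : pvAnyKw pvPromoA (PySem.Str.lower s) = true <;>
            by_cases h4 : pvAnyKw pvNewsA (PySem.Str.lower s) = true <;>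
              simp [h1, h2, h3, h4]
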